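-- pv_equiv track=rewrite | github.com/15r10nk/codecrumbs | src/codecrumbs/_rewrite_code.py | code_stream
-- ===== SOURCE A (Python) =====
-- def code_stream(source):
--     idx = 0
--     p_line = 1
--     p_col = 0
--     while idx < len(source):
--         c = source[idx]
--         if c == "\r" and idx + 1 < len(source) and source[idx + 1] == "\n":
--             # \r\n
--             yield (p_line, p_col), idx, "\r\n"
--             idx += 1
--             p_line += 1
--             p_col = 0
--         elif c in "\r\n":
--             # \r or \n
--             yield (p_line, p_col), idx, c
--             p_line += 1
--             p_col = 0
--         else:
--             yield (p_line, p_col), idx, c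
--             p_col += 1
--         idx += 1
-- ===== SOURCE B (Python) =====
-- def code_stream(source):
--     # phase 1: tokenize, combining "\r\n" into one token
--     toks = []
--     i, n = 0, len(source)
--     while i < n:
--         tok = "\r\n" if source.startswith("\r\n", i) else source[i]
--         toks.append((i, tok))
--         i += len(tok)
--     # phase 2: annotate tokens with (line, col)
--     line, col = 1, 0
--     for i, tok in toks:
--         yield (line, col), i, tok
--         if tok in ("\r\n", "\r", "\n"):
--             line, col = line + 1, 0
--         else:
--             col += 1
-- ===== Notes on version B (the rewrite author's own statement) =====
-- stated objective: alternative
-- what changed: A's single fused while-loop with manual CRLF lookahead and inline line/column bookkeeping is replaced by a two-phase pipeline: a startswith-based tokenizer that emits (index, token) pairs with \r\n combined, followed by a uniform annotation pass assigning (line, col).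
import Mathlib
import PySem

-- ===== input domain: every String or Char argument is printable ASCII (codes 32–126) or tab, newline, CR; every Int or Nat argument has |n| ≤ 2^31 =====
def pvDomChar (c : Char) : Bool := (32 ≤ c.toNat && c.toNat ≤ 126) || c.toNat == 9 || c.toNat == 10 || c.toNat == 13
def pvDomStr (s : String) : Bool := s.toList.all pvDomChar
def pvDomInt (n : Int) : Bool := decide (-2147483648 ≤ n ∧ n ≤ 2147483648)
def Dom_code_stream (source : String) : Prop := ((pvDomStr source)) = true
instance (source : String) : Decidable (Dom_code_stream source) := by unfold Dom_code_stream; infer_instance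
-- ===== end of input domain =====

-- B replaces A's single fused while-loop (manual CRLF lookahead + position bookkeeping in one body)
-- by a two-phase pipeline: a tokenizer producing (index, token) pairs, then a uniform annotation pass
-- assigning line/column (objective: alternative decomposition; same cost).

-- ===== PORT A =====
-- A's while loop over idx, transcribed as recursion on the remaining characters
-- (c = source[idx]; the lookahead 'idx+1 < len(source) and source[idx+1] == "\n"' is the head? test)
def codeStreamGoA : List Char → Int → Int → Int → List ((Int × Int) × Int × String)
  | [], _, _, _ => []
  | c :: rest, idx, line, col =>
    if c = '\r' ∧ rest.head? = some '\n' then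
      ((line, col), idx, "\r\n") :: codeStreamGoA rest.tail (idx + 2) (line + 1) 0
    else if c = '\r' ∨ c = '\n' then
      ((line, col), idx, String.ofList [c]) :: codeStreamGoA rest (idx + 1) (line + 1) 0
    else
      ((line, col), idx, String.ofList [c]) :: codeStreamGoA rest (idx + 1) line (col + 1)
termination_by cs => cs.length
decreasing_by all_goals simp [List.length_tail]

def code_stream (source : String) : List ((Int × Int) × Int × String) :=
  codeStreamGoA source.toList 0 1 0

-- ===== PORT B =====
-- B phase 1: tokenize; 'source.startswith("\r\n", i)' is the isPrefixOf test on the remaining chars,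
-- 'i += len(tok)' consumes len(tok) characters
def codeStreamToksB : List Char → Int → List (Int × String)
  | [], _ => []
  | c :: rest, i =>
    if ['\r', '\n'].isPrefixOf (c :: rest) then
      (i, "\r\n") :: codeStreamToksB rest.tail (i + 2)
    else
      (i, String.ofList [c]) :: codeStreamToksB rest (i + 1)
termination_by cs => cs.length
decreasing_by all_goals simp [List.length_tail]

-- B phase 2: annotate tokens with (line, col); 'tok in ("\r\n", "\r", "\n")' is the disjunction
def codeStreamAnnB : List (Int × String) → Int → Int → List ((Int × Int) × Int × String)
  | [], _, _ => []
  | (i, tok) :: ts, line, col =>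
    ((line, col), i, tok) ::
      (if tok = "\r\n" ∨ tok = "\r" ∨ tok = "\n" then codeStreamAnnB ts (line + 1) 0
       else codeStreamAnnB ts line (col + 1))

def code_stream_alt (source : String) : List ((Int × Int) × Int × String) :=
  codeStreamAnnB (codeStreamToksB source.toList 0) 1 0

-- ===== PRECONDITION & SPEC =====
def Spec_code_stream (source : String) (out : List ((Int × Int) × Int × String)) : Prop := out = code_stream_alt source
instance (source : String) (out : List ((Int × Int) × Int × String)) : Decidable (Spec_code_stream source out) := by unfold Spec_code_stream; infer_instance

-- ===== CLAIM (what is proved, stated in full; the proofs are below) =====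
def Claim_equal_code_stream : Prop := ∀ (source : String), Dom_code_stream source → Spec_code_stream source (code_stream source)

-- ===== LEMMAS AND PROOFS =====
@[simp] lemma singleton_ne_crlf (c : Char) : ¬ (String.ofList [c] = "\r\n") := by
  intro h; have := congrArg String.toList h; simp at this

@[simp] lemma singleton_eq_cr (c : Char) : (String.ofList [c] = "\r") ↔ c = '\r' := by
  constructor
  · intro h; have := congrArg String.toList h; simpa using this
  · intro h; rw [h]

@[simp] lemma singleton_eq_lf (c : Char) : (String.ofList [c] = "\n") ↔ c = '\n' := by
  constructor
  · intro h; have := congrArg String.toList h; simpa using this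
  · intro h; rw [h]

lemma go_eq : ∀ (n : Nat) (cs : List Char), cs.length ≤ n → ∀ (idx line col : Int),
    codeStreamGoA cs idx line col = codeStreamAnnB (codeStreamToksB cs idx) line col := by
  intro n
  induction n with
  | zero =>
    intro cs h idx line col
    have : cs = [] := List.eq_nil_of_length_eq_zero (Nat.le_zero.mp h)
    subst this
    simp [codeStreamGoA, codeStreamToksB, codeStreamAnnB]
  | succ n ih =>
    intro cs h idx line col
    cases cs with
    | nil => simp [codeStreamGoA, codeStreamToksB, codeStreamAnnB]
    | cons c rest =>
      by_cases hp : ['\r', '\n'].isPrefixOf (c :: rest)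
      · obtain ⟨t, ht⟩ := List.isPrefixOf_iff_prefix.mp hp
        obtain ⟨hc, hrest⟩ : c = '\r' ∧ rest = '\n' :: t := by
          simpa using ht.symm
        subst hc; subst hrest
        rw [codeStreamGoA, if_pos (by simp), codeStreamToksB, if_pos hp]
        rw [codeStreamAnnB, if_pos (Or.inl rfl)]
        simp only [List.tail_cons]
        rw [ih t (by simp at h; omega)]
      · have hA : ¬ (c = '\r' ∧ rest.head? = some '\n') := by
          rintro ⟨h1, h2⟩
          apply hp
          cases rest with
          | nil => simp at h2
          | cons d r =>
            simp at h2
            subst h1; subst h2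
            simp [List.isPrefixOf]
        rw [codeStreamGoA, if_neg hA, codeStreamToksB, if_neg hp]
        rw [codeStreamAnnB]
        have hrec := ih rest (by simp at h; omega)
        by_cases hc : c = '\r' ∨ c = '\n'
        · rw [if_pos hc, if_pos (by simpa using hc)]
          rw [hrec]
        · rw [if_neg hc, if_neg (by simpa using hc)]
          rw [hrec]

-- ===== VERDICT (by name: the statement is the Claim_ definition above) =====
theorem code_stream_spec : Claim_equal_code_stream := by
  intro source _
  unfold Spec_code_stream code_stream code_stream_alt
  exact go_eq source.toList.length source.toList le_rfl 0 1 0
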